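-- pv_equiv track=rewrite | github.com/WrightonLabCSU/CAMPER | CAMPER_DRAMKit/camper_dramkit/camper_distill.py | make_strings_no_repeats
-- ===== SOURCE A (Python) =====
-- from collections import Counter, defaultdict
--
-- def make_strings_no_repeats(genome_taxa_dict):
--     labels = dict()
--     seen = Counter()
--     for genome, taxa_string in genome_taxa_dict.items():
--         final_taxa_string = '%s_%s' % (taxa_string, str(seen[taxa_string]))
--         seen[taxa_string] += 1
--         labels[genome] = final_taxa_string
--     return labels
-- ===== SOURCE B (Python) =====
-- from collections import defaultdict
--
-- def make_strings_no_repeats(genome_taxa_dict):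
--     # Stage 1: group genomes by their taxa string (insertion order preserved).
--     groups = defaultdict(list)
--     for genome, taxa_string in genome_taxa_dict.items():
--         groups[taxa_string].append(genome)
--     # Stage 2: within each group, the position of a genome is its suffix.
--     labels = dict()
--     for taxa_string, genomes in groups.items():
--         for i, genome in enumerate(genomes):
--             labels[genome] = '%s_%s' % (taxa_string, i)
--     # Return the labels in the original key order.
--     return {genome: labels[genome] for genome in genome_taxa_dict}
-- ===== Notes on version B (the rewrite author's own statement) =====
-- stated objective: alternative
-- what changed: B replaces A's single pass with a running Counter by a staged decomposition: it first groups genomes into lists keyed by taxa string, then assigns each genome the enumerate index within its group, and finally emits the labels in the original key order; the suffix state disappears because a genome's group position equals its prior-occurrence count.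
import Mathlib
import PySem

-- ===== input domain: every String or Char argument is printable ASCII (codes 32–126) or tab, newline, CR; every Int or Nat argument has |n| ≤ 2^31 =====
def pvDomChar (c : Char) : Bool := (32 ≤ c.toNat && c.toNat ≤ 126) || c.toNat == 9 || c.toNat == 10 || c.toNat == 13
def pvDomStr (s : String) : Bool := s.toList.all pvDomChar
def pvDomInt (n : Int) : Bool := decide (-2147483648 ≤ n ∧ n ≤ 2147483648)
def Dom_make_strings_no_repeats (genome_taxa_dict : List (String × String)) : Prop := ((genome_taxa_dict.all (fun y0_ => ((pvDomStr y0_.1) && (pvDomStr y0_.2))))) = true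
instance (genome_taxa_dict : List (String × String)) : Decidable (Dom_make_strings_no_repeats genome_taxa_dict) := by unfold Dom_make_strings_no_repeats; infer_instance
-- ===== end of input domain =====

-- B replaces A's single pass with a running Counter by a staged group-then-enumerate
-- decomposition (alternative; same O(n) cost, not claimed faster).

-- ===== PORT A =====
-- A: one pass keeping a running Counter 'seen'; labels[genome] = taxa + '_' + str(seen[taxa]).
def makeStringsGoA : List (String × String) → PySem.Dict String String → PySem.Dict String Int → PySem.Dict String String
  | [], labels, _ => labels
  | (genome, taxa_string) :: rest, labels, seen =>
      let final_taxa_string := taxa_string ++ "_" ++ PySem.Int.toStr (seen.getD taxa_string 0)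
      makeStringsGoA rest (labels.insert genome final_taxa_string) (seen.modify taxa_string 0 (· + 1))

def make_strings_no_repeats (genome_taxa_dict : List (String × String)) : List (String × String) :=
  (makeStringsGoA genome_taxa_dict PySem.Dict.empty PySem.Dict.empty).items

-- ===== PORT B =====
-- Stage 1: groups = defaultdict(list); groups[taxa_string].append(genome)
def altGroups (genome_taxa_dict : List (String × String)) : PySem.Dict String (List String) :=
  genome_taxa_dict.foldl (fun d p => d.modify p.2 [] (· ++ [p.1])) PySem.Dict.empty

-- Stage 2: for taxa_string, genomes in groups: for i, genome in enumerate(genomes): labels[genome] = '%s_%s' % (taxa_string, i)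
def altLabels (groups : PySem.Dict String (List String)) : PySem.Dict String String :=
  groups.items.foldl
    (fun labels p =>
      (PySem.List.enumerate p.2).foldl
        (fun labels q => labels.insert q.2 (p.1 ++ "_" ++ PySem.Int.toStr q.1)) labels)
    PySem.Dict.empty

-- Stage 3: {genome: labels[genome] for genome in genome_taxa_dict} — every genome was grouped,
-- so labels[genome] never raises; the getD default is never read.
def make_strings_no_repeats_alt (genome_taxa_dict : List (String × String)) : List (String × String) :=
  let labels := altLabels (altGroups genome_taxa_dict)
  (genome_taxa_dict.foldl (fun d p => d.insert p.1 (labels.getD p.1 "")) PySem.Dict.empty).items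

-- ===== PRECONDITION & SPEC =====
-- Pre_ excludes association lists with duplicate genome keys: the Python argument is a dict,
-- whose keys are necessarily distinct, so such lists encode no Python input.
def Pre_make_strings_no_repeats (genome_taxa_dict : List (String × String)) : Prop :=
  (genome_taxa_dict.map Prod.fst).Nodup
instance (genome_taxa_dict : List (String × String)) : Decidable (Pre_make_strings_no_repeats genome_taxa_dict) := by unfold Pre_make_strings_no_repeats; infer_instance
def pvWitness_make_strings_no_repeats : (List (String × String)) := [("a", "x"), ("b", "x"), ("c", "y")]
def Spec_make_strings_no_repeats (genome_taxa_dict : List (String × String)) (out : List (String × String)) : Prop := out = make_strings_no_repeats_alt genome_taxa_dict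
instance (genome_taxa_dict : List (String × String)) (out : List (String × String)) : Decidable (Spec_make_strings_no_repeats genome_taxa_dict out) := by unfold Spec_make_strings_no_repeats; infer_instance

-- ===== CLAIM (what is proved, stated in full; the proofs are below) =====
def Claim_equal_make_strings_no_repeats : Prop := ∀ (genome_taxa_dict : List (String × String)), Dom_make_strings_no_repeats genome_taxa_dict → Pre_make_strings_no_repeats genome_taxa_dict → Spec_make_strings_no_repeats genome_taxa_dict (make_strings_no_repeats genome_taxa_dict)

-- ===== LEMMAS AND PROOFS =====

-- the label '%s_%s' % (t, n)
def lab (t : String) (n : Int) : String := t ++ "_" ++ PySem.Int.toStr n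

-- canonical result: the i-th entry (g, t) is labelled with the count of t among earlier taxa
def canonGo : List String → List (String × String) → List (String × String)
  | _, [] => []
  | ts, (g, t) :: r => (g, lab t (ts.count t)) :: canonGo (ts ++ [t]) r

-- the group of taxa string t: the genomes of the entries carrying t, in input order
def grp (l : List (String × String)) (t : String) : List String :=
  (l.filter (fun p => p.2 == t)).map Prod.fst

lemma A_go (rest : List (String × String)) : ∀ (ts : List String) (d : PySem.Dict String String),
    (∀ p ∈ rest, d.contains p.1 = false) → (rest.map Prod.fst).Nodup →
    (makeStringsGoA rest d (PySem.Dict.counter ts)).items = d.items ++ canonGo ts rest := by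
  induction rest with
  | nil => intro ts d _ _; simp [makeStringsGoA, canonGo]
  | cons p rest ih =>
    intro ts d hfresh hnd
    obtain ⟨g, t⟩ := p
    simp only [makeStringsGoA, canonGo]
    rw [PySem.Dict.getD_counter, ← PySem.Dict.counter_append_singleton]
    rw [ih (ts ++ [t]) _ ?_ ?_]
    · rw [PySem.Dict.items_insert_of_not_contains _ _ (hfresh (g, t) (by simp))]
      simp [lab]
    · intro q hq
      rw [PySem.Dict.contains_insert]
      have : q.1 ≠ g := by
        simp only [List.map_cons, List.nodup_cons] at hnd
        intro h; exact hnd.1 (h ▸ List.mem_map_of_mem hq)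
      simp [this, hfresh q (by simp [hq])]
    · simp only [List.map_cons, List.nodup_cons] at hnd; exact hnd.2

lemma altGroups_getD (l : List (String × String)) (t : String) :
    (altGroups l).getD t [] = grp l t := by
  have h : altGroups l = (l.map (fun p => (p.2, p.1))).foldl (fun d p => d.modify p.1 [] (· ++ [p.2])) PySem.Dict.empty := by
    rw [List.foldl_map]; rfl
  rw [h, PySem.Dict.getD_foldl_modify_append]
  simp [grp, List.filter_map, Function.comp_def]

lemma altGroups_keys (l : List (String × String)) :
    (altGroups l).keys = PySem.Set.ofList (l.map Prod.snd) := by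
  have h := PySem.Dict.keys_foldl_modify_key l (fun p => p.2) ([] : List String)
    (fun _ p v => v ++ [p.1]) PySem.Dict.empty
  simp only [altGroups]
  rw [h]
  simp [PySem.Set.update, PySem.Set.ofList]

lemma inner_skip (gs : List String) : ∀ (s : Int) (u : String) (d : PySem.Dict String String) (g : String), g ∉ gs →
    ((PySem.List.enumerate gs s).foldl (fun d q => d.insert q.2 (u ++ "_" ++ PySem.Int.toStr q.1)) d).get? g = d.get? g := by
  induction gs with
  | nil => intro s u d g _; simp [PySem.List.enumerate_nil]
  | cons x xs ih =>
    intro s u d g hg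
    simp only [List.mem_cons, not_or] at hg
    rw [PySem.List.enumerate_cons, List.foldl_cons, ih _ _ _ _ hg.2]
    exact PySem.Dict.get?_insert_of_ne _ _ hg.1

lemma inner_hit (ga gb : List String) (s : Int) (u : String) (d : PySem.Dict String String) (g : String) (hgb : g ∉ gb) :
    ((PySem.List.enumerate (ga ++ g :: gb) s).foldl (fun d q => d.insert q.2 (u ++ "_" ++ PySem.Int.toStr q.1)) d).get? g
      = some (lab u (s + ga.length)) := by
  rw [PySem.List.enumerate_append, List.foldl_append, PySem.List.enumerate_cons, List.foldl_cons,
    inner_skip gb _ _ _ _ hgb, PySem.Dict.get?_insert_self]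
  rfl

lemma outer_skip (pairs : List (String × List String)) : ∀ (d : PySem.Dict String String) (g : String),
    (∀ pu ∈ pairs, g ∉ pu.2) →
    (pairs.foldl (fun labels p => (PySem.List.enumerate p.2).foldl
        (fun labels q => labels.insert q.2 (p.1 ++ "_" ++ PySem.Int.toStr q.1)) labels) d).get? g = d.get? g := by
  induction pairs with
  | nil => intro d g _; rfl
  | cons p ps ih =>
    intro d g h
    rw [List.foldl_cons, ih _ _ (fun q hq => h q (by simp [hq]))]
    exact inner_skip _ _ _ _ _ (h p (by simp))

lemma labels_get (l pre post : List (String × String)) (g t : String)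
    (hl : l = pre ++ (g, t) :: post) (hnd : (l.map Prod.fst).Nodup) :
    (altLabels (altGroups l)).get? g = some (lab t ((pre.map Prod.snd).count t)) := by
  have hmem : (g, t) ∈ l := by simp [hl]
  -- the fst-keys are unique, so (g, t) is the only entry whose key is g
  have huniq : ∀ p ∈ l, p.1 = g → p = (g, t) := fun p hp h =>
    List.inj_on_of_nodup_map hnd hp hmem h
  have hkeys := altGroups_keys l
  have htmem : t ∈ (altGroups l).keys := by
    rw [hkeys, PySem.Set.mem_ofList]; exact List.mem_map.mpr ⟨(g, t), hmem, rfl⟩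
  have hknd : (altGroups l).keys.Nodup := by rw [hkeys]; exact PySem.Set.nodup_ofList _
  obtain ⟨sA, sB, hs⟩ := List.append_of_mem htmem
  have hts : t ∉ sA ∧ t ∉ sB := by
    rw [hs] at hknd
    simp only [List.nodup_append, List.nodup_cons] at hknd
    exact ⟨fun h => hknd.2.2 t h t (by simp) rfl, hknd.2.1.1⟩
  have hitems : (altGroups l).items
      = sA.map (fun u => (u, grp l u)) ++ (t, grp l t) :: sB.map (fun u => (u, grp l u)) := by
    rw [PySem.Dict.items_eq_map_keys _ hknd ([] : List String), hs]
    simp only [List.map_append, List.map_cons, altGroups_getD]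
  have hnotin : ∀ u, u ≠ t → g ∉ grp l u := by
    intro u hu hg
    obtain ⟨p, hp, hp1⟩ := List.mem_map.mp hg
    have hpl := List.mem_of_mem_filter hp
    have hpe := huniq p hpl hp1
    have h2 := (List.mem_filter.mp hp).2
    rw [hpe] at h2
    have h3 : t = u := by simpa using h2
    exact hu h3.symm
  have hgrps : grp l t = grp pre t ++ g :: grp post t := by
    simp [grp, hl, List.filter_append]
  have hgpost : g ∉ grp post t := by
    intro hg
    obtain ⟨p, hp, hp1⟩ := List.mem_map.mp hg
    have hpl := List.mem_of_mem_filter hp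
    have hnd' := hnd
    rw [hl] at hnd'
    simp only [List.map_append, List.map_cons] at hnd'
    exact (List.nodup_cons.mp (List.nodup_append.mp hnd').2.1).1
      (hp1 ▸ List.mem_map_of_mem hpl)
  unfold altLabels
  rw [hitems, List.foldl_append, List.foldl_cons,
    outer_skip _ _ _ (fun pu hpu => by
      obtain ⟨u, hu, rfl⟩ := List.mem_map.mp hpu
      exact hnotin u (fun h => hts.2 (h ▸ hu)))]
  rw [hgrps]
  rw [inner_hit _ _ _ _ _ _ hgpost]
  have hc : ((grp pre t).length : Int) = ((pre.map Prod.snd).count t : Int) := by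
    simp only [grp, List.length_map, List.count_eq_countP,
      List.countP_eq_length_filter, List.filter_map, Function.comp_def]
  rw [zero_add] at *
  simp [hc]

lemma final_map (labels : PySem.Dict String String) :
    ∀ (l2 : List (String × String)) (ts : List String),
    (∀ pre g t post, l2 = pre ++ (g, t) :: post → labels.getD g "" = lab t ((ts ++ pre.map Prod.snd).count t)) →
    l2.map (fun p => (p.1, labels.getD p.1 "")) = canonGo ts l2 := by
  intro l2
  induction l2 with
  | nil => intro ts _; rfl
  | cons p r ih =>
    obtain ⟨g, t⟩ := p
    intro ts H
    simp only [List.map_cons, canonGo]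
    have h0 := H [] g t r (by simp)
    simp only [List.map_nil, List.append_nil] at h0
    rw [h0]
    congr 1
    apply ih (ts ++ [t])
    intro pre g' t' post hr
    have := H ((g, t) :: pre) g' t' post (by simp [hr])
    simpa [List.count_append] using this

lemma B_eq_canon (l : List (String × String)) (hnd : (l.map Prod.fst).Nodup) :
    make_strings_no_repeats_alt l = canonGo [] l := by
  unfold make_strings_no_repeats_alt
  rw [PySem.Dict.items_foldl_insert_fresh l Prod.fst _ PySem.Dict.empty
    (fun a _ => PySem.Dict.contains_empty _) hnd]
  refine Eq.trans ?_ (final_map (altLabels (altGroups l)) l [] ?_)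
  · rfl
  · intro pre g t post hl2
    rw [PySem.Dict.getD_of_get?_eq_some _ _ (labels_get l pre post g t hl2 hnd)]
    simp

-- ===== VERDICT (by name: the statement is the Claim_ definition above) =====
theorem make_strings_no_repeats_spec : Claim_equal_make_strings_no_repeats := by
  intro l _ hnd
  unfold Spec_make_strings_no_repeats
  rw [B_eq_canon l hnd]
  unfold make_strings_no_repeats
  have h := A_go l [] PySem.Dict.empty (by intro p _; exact PySem.Dict.contains_empty _) hnd
  simpa [PySem.Dict.counter] using h
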